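-- pv_equiv track=rewrite | github.com/CHANCHALCHAVHAN/Company_Problem-statement-and-its-Solutions | Plus-Minus Matchup.py | is_winnable
-- ===== SOURCE A (Python) =====
-- def is_winnable(N, s, A, B):
--     possible_sums = {0}  # Start with an initial sum of 0
--     for i in range(N):
--         next_sums = set()
--         for val in possible_sums:
--             if s[i] == '+':
--                 next_sums.add(val + A)
--                 next_sums.add(val + B)
--             else:
--                 next_sums.add(val - A)
--                 next_sums.add(val - B)
--         possible_sums = next_sums  # Update possible sums
--     return "YES" if 0 in possible_sums else "NO"
-- ===== SOURCE B (Python) =====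
-- def is_winnable(N, s, A, B):
--     n = max(N, 0)
--     p = sum(1 for c in s[:n] if c == '+')
--     m = n - p
--     base = A * (p - m)
--     d = B - A
--     if d == 0:
--         ok = (base == 0)
--     else:
--         q, r = divmod(-base, d)
--         ok = (r == 0 and -m <= q <= p)
--     return "YES" if ok else "NO"
-- ===== Notes on version B (the rewrite author's own statement) =====
-- stated objective: faster
-- what changed: Replaces the per-move set of reachable sums with a closed form: count p of '+' among the first N moves gives base = A*(p-m) and reachable sums base + (B-A)*t for integer t in [-m,p], so the answer is one divisibility-and-range check (divmod) instead of a breadth-first set expansion.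
import Mathlib
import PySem

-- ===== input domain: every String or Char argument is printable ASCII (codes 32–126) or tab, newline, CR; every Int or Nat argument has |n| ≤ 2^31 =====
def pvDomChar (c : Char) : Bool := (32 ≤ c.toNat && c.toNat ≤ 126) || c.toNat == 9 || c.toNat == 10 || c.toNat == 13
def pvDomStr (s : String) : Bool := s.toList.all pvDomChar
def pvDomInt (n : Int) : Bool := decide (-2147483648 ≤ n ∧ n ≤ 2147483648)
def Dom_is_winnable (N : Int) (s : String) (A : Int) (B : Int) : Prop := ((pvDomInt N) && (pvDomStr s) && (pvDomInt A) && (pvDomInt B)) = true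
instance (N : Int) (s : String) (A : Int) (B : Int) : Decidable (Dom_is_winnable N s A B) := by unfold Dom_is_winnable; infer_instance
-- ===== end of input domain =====

-- B replaces A's breadth-first set of reachable sums by a closed-form divisibility-and-range check (faster).

-- ===== PORT A =====
def is_winnable (N : Int) (s : String) (A : Int) (B : Int) : String :=
  let possible_sums : PySem.Set Int :=
    (PySem.List.pyRange 0 N 1).foldl
      (fun possible_sums i =>
        possible_sums.foldl
          (fun next_sums val =>
            if PySem.Str.pyGet? s i == some '+' then
              PySem.Set.add (PySem.Set.add next_sums (val + A)) (val + B)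
            else
              PySem.Set.add (PySem.Set.add next_sums (val - A)) (val - B))
          PySem.Set.empty)
      (PySem.Set.ofList [0])
  if PySem.Set.contains possible_sums 0 then "YES" else "NO"

-- ===== PORT B =====
def is_winnable_alt (N : Int) (s : String) (A : Int) (B : Int) : String :=
  let n : Int := max N 0
  let p : Int := (PySem.Str.slice s none (some n)).toList.foldl
      (fun acc c => if c == '+' then acc + 1 else acc) 0
  let m : Int := n - p
  let base : Int := A * (p - m)
  let d : Int := B - A
  let ok : Bool :=
    if d = 0 then base == 0
    else
      match PySem.Int.divmod? (-base) d with
      | some (q, r) => r == 0 && (decide (-m ≤ q) && decide (q ≤ p))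
      | none => false   -- unreachable: d ≠ 0
  if ok then "YES" else "NO"

-- ===== PRECONDITION & SPEC =====
-- Pre_: A raises IndexError (s[i] out of range) exactly when N > len(s); nothing else is excluded.
def Pre_is_winnable (N : Int) (s : String) (A : Int) (B : Int) : Prop :=
  N ≤ (s.toList.length : Int)
instance (N : Int) (s : String) (A : Int) (B : Int) : Decidable (Pre_is_winnable N s A B) := by
  unfold Pre_is_winnable; infer_instance
def pvWitness_is_winnable : Int × String × Int × Int := (2, "+-", 3, 5)

def Spec_is_winnable (N : Int) (s : String) (A : Int) (B : Int) (out : String) : Prop := out = is_winnable_alt N s A B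
instance (N : Int) (s : String) (A : Int) (B : Int) (out : String) : Decidable (Spec_is_winnable N s A B out) := by unfold Spec_is_winnable; infer_instance

-- ===== CLAIM (what is proved, stated in full; the proofs are below) =====
def Claim_equal_is_winnable : Prop := ∀ (N : Int) (s : String) (A : Int) (B : Int), Dom_is_winnable N s A B → Pre_is_winnable N s A B → Spec_is_winnable N s A B (is_winnable N s A B)

-- ===== LEMMAS AND PROOFS =====

-- membership in the inner two-adds fold
lemma mem_inner_fold (S acc : List Int) (f g : Int → Int) (x : Int) :
    x ∈ S.foldl (fun ns v => PySem.Set.add (PySem.Set.add ns (f v)) (g v)) acc ↔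
      x ∈ acc ∨ ∃ v ∈ S, x = f v ∨ x = g v := by
  induction S generalizing acc with
  | nil => simp
  | cons a S ih =>
    simp only [List.foldl_cons, ih, PySem.Set.mem_add, List.mem_cons]
    constructor
    · rintro (((h | h) | h) | ⟨v, hv, h⟩)
      · exact Or.inl h
      · exact Or.inr ⟨a, Or.inl rfl, Or.inl h⟩
      · exact Or.inr ⟨a, Or.inl rfl, Or.inr h⟩
      · exact Or.inr ⟨v, Or.inr hv, h⟩
    · rintro (h | ⟨v, (rfl | hv), h⟩)
      · exact Or.inl (Or.inl (Or.inl h))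
      · rcases h with h | h
        · exact Or.inl (Or.inl (Or.inr h))
        · exact Or.inl (Or.inr h)
      · exact Or.inr ⟨v, hv, h⟩

-- the number of '+' among the first k moves, as an Int
def pcount (cs : List Char) (k : Nat) : Int := ((cs.take k).count '+' : Int)

lemma pcount_nonneg (cs : List Char) (k : Nat) : 0 ≤ pcount cs k := by
  simp [pcount]

lemma pcount_le (cs : List Char) (k : Nat) (hk : k ≤ cs.length) : pcount cs k ≤ (k : Int) := by
  unfold pcount
  have h := List.count_le_length (l := cs.take k) (a := '+')
  have h2 : (cs.take k).length = k := by simp [List.length_take, Nat.min_eq_left hk]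
  rw [h2] at h
  exact_mod_cast h

lemma pcount_succ (cs : List Char) (k : Nat) (hk : k < cs.length) :
    pcount cs (k + 1) = pcount cs k + (if cs[k] = '+' then 1 else 0) := by
  have ht : cs.take (k + 1) = cs.take k ++ [cs[k]] := by
    rw [List.take_add_one, List.getElem?_eq_getElem hk]; rfl
  unfold pcount
  rw [ht, List.count_append]
  by_cases h : cs[k] = '+' <;> simp [h]

-- invariant of A's outer loop: after k steps the reachable sums are
-- exactly A*(p-m) + (B-A)*t for t ∈ [-m, p], p = pcount, m = k - p
lemma loopA_mem (s : String) (A B : Int) (k : Nat) (hk : k ≤ s.toList.length) (x : Int) :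
    (x ∈ (PySem.List.pyRange 0 (k : Int) 1).foldl
      (fun possible_sums i =>
        possible_sums.foldl
          (fun next_sums val =>
            if PySem.Str.pyGet? s i == some '+' then
              PySem.Set.add (PySem.Set.add next_sums (val + A)) (val + B)
            else
              PySem.Set.add (PySem.Set.add next_sums (val - A)) (val - B))
          PySem.Set.empty)
      (PySem.Set.ofList [0])) ↔
    ∃ t : Int, -((k : Int) - pcount s.toList k) ≤ t ∧ t ≤ pcount s.toList k ∧
      x = A * (pcount s.toList k - ((k : Int) - pcount s.toList k)) + (B - A) * t := by
  induction k generalizing x with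
  | zero =>
    simp only [Nat.cast_zero, PySem.List.pyRange_zero]
    constructor
    · intro h
      have : x = 0 := by simpa [PySem.Set.ofList] using h
      exact ⟨0, by simp [pcount, this]⟩
    · rintro ⟨t, h1, h2, h3⟩
      have ht : t = 0 := by simp [pcount] at h1 h2; omega
      subst ht
      have : x = 0 := by simpa [pcount] using h3
      simp [this, PySem.Set.ofList]
  | succ k ih =>
    have hk' : k < s.toList.length := by omega
    have hrange : PySem.List.pyRange 0 ((k : Int) + 1) 1 =
        PySem.List.pyRange 0 (k : Int) 1 ++ [(k : Int)] := by
      exact PySem.List.pyRange_one_succ_right (by positivity)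
    have hget : PySem.Str.pyGet? s (k : Int) = some s.toList[k] := by
      simp [List.getElem?_eq_getElem hk']
    have hple : pcount s.toList k ≤ (k : Int) := pcount_le _ _ (le_of_lt hk')
    have hpn : 0 ≤ pcount s.toList k := pcount_nonneg _ _
    push_cast
    rw [hrange, List.foldl_append, List.foldl_cons, List.foldl_nil]
    by_cases hc : s.toList[k] = '+'
    · have hcond : (PySem.Str.pyGet? s (k : Int) == some '+') = true := by
        rw [hget, hc]; rfl
      simp only [hcond, if_true]
      rw [mem_inner_fold _ _ (· + A) (· + B)]
      have hpk : pcount s.toList (k + 1) = pcount s.toList k + 1 := by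
        rw [pcount_succ _ _ hk']; simp [hc]
      push_cast at hpk
      rw [hpk]
      constructor
      · rintro (h | ⟨v, hv, h⟩)
        · simp [PySem.Set.empty] at h
        · rcases (ih (le_of_lt hk') v).1 hv with ⟨t, h1, h2, h3⟩
          rcases h with h | h
          · exact ⟨t, by omega, by omega, by subst h h3; ring⟩
          · exact ⟨t + 1, by omega, by omega, by subst h h3; ring⟩
      · rintro ⟨t, h1, h2, h3⟩
        by_cases ht : t ≤ pcount s.toList k
        · refine Or.inr ⟨A * (pcount s.toList k - ((k : Int) - pcount s.toList k)) + (B - A) * t,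
            (ih (le_of_lt hk') _).2 ⟨t, by omega, ht, rfl⟩, Or.inl ?_⟩
          subst h3; ring
        · have ht1 : t = pcount s.toList k + 1 := by omega
          refine Or.inr ⟨A * (pcount s.toList k - ((k : Int) - pcount s.toList k)) + (B - A) * (t - 1),
            (ih (le_of_lt hk') _).2 ⟨t - 1, by omega, by omega, rfl⟩, Or.inr ?_⟩
          subst h3; ring
    · have hcond : (PySem.Str.pyGet? s (k : Int) == some '+') = false := by
        rw [hget]; simp [hc]
      simp only [hcond, Bool.false_eq_true, if_false]
      rw [mem_inner_fold _ _ (· - A) (· - B)]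
      have hpk : pcount s.toList (k + 1) = pcount s.toList k := by
        rw [pcount_succ _ _ hk']; simp [hc]
      push_cast at hpk
      rw [hpk]
      constructor
      · rintro (h | ⟨v, hv, h⟩)
        · simp [PySem.Set.empty] at h
        · rcases (ih (le_of_lt hk') v).1 hv with ⟨t, h1, h2, h3⟩
          rcases h with h | h
          · exact ⟨t, by omega, by omega, by subst h h3; ring⟩
          · exact ⟨t - 1, by omega, by omega, by subst h h3; ring⟩
      · rintro ⟨t, h1, h2, h3⟩
        by_cases ht : -((k : Int) - pcount s.toList k) ≤ t
        · refine Or.inr ⟨A * (pcount s.toList k - ((k : Int) - pcount s.toList k)) + (B - A) * t,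
            (ih (le_of_lt hk') _).2 ⟨t, ht, by omega, rfl⟩, Or.inl ?_⟩
          subst h3; ring
        · refine Or.inr ⟨A * (pcount s.toList k - ((k : Int) - pcount s.toList k)) + (B - A) * (t + 1),
            (ih (le_of_lt hk') _).2 ⟨t + 1, by omega, by omega, rfl⟩, Or.inr ?_⟩
          subst h3; ring

-- B's boolean check decides exactly the existence of t
lemma alt_check (p m A B : Int) (hp : 0 ≤ p) (hm : 0 ≤ m) :
    ((if B - A = 0 then (A * (p - m) == 0)
      else
        match PySem.Int.divmod? (-(A * (p - m))) (B - A) with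
        | some (q, r) => r == 0 && (decide (-m ≤ q) && decide (q ≤ p))
        | none => false) = true) ↔
    ∃ t : Int, -m ≤ t ∧ t ≤ p ∧ (0 : Int) = A * (p - m) + (B - A) * t := by
  set base := A * (p - m) with hbase
  set d := B - A with hd
  by_cases hdz : d = 0
  · simp only [hdz, if_true, beq_iff_eq]
    constructor
    · intro h; exact ⟨0, by omega, by omega, by simp [h]⟩
    · rintro ⟨t, _, _, h3⟩; simp at h3; omega
  · simp only [hdz, if_false]
    have hdm : PySem.Int.divmod? (-base) d =
        some (PySem.Int.floordiv (-base) d, PySem.Int.mod (-base) d) := by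
      simp [PySem.Int.divmod?, PySem.Int.floordiv, PySem.Int.mod, hdz]
    rw [hdm]
    set q := PySem.Int.floordiv (-base) d with hq
    set r := PySem.Int.mod (-base) d with hr
    have hqr : q * d + r = -base := PySem.Int.floordiv_mul_add_mod (-base) d
    simp only [Bool.and_eq_true, beq_iff_eq, decide_eq_true_eq]
    constructor
    · rintro ⟨hr0, h1, h2⟩
      refine ⟨q, h1, h2, ?_⟩
      have : q * d = -base := by omega
      linarith [this]
    · rintro ⟨t, h1, h2, h3⟩
      have htd : d * t = -base := by linarith
      have hdvd : d ∣ (-base) := ⟨t, htd.symm⟩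
      have hr0 : r = 0 := by
        rw [hr]; exact (PySem.Int.mod_eq_zero_iff_dvd _ _).2 hdvd
      have hqd : q * d = -base := by omega
      have hqt : q = t := by
        have : q * d = d * t := by rw [hqd, htd]
        have := mul_left_cancel₀ hdz (by linarith [this] : d * q = d * t)
        exact this
      exact ⟨hr0, by omega, by omega⟩

lemma contains_iff_mem (s : PySem.Set Int) (x : Int) :
    PySem.Set.contains s x = true ↔ x ∈ s := by
  simp [PySem.Set.contains]

lemma ifYN_congr (c1 c2 : Bool) (h : c1 = true ↔ c2 = true) :
    (if c1 then "YES" else "NO") = (if c2 then "YES" else "NO") := by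
  cases c1 <;> cases c2 <;> simp_all

-- ===== VERDICT (by name: the statement is the Claim_ definition above) =====
theorem is_winnable_spec : Claim_equal_is_winnable := by
  intro N s A B hdom hpre
  unfold Spec_is_winnable
  unfold Pre_is_winnable at hpre
  unfold is_winnable is_winnable_alt
  simp only []
  by_cases hN : N ≤ 0
  · -- empty range: both sides answer YES
    rw [PySem.List.pyRange_one_eq_nil hN]
    have hmax : max N 0 = 0 := by omega
    rw [hmax]
    apply ifYN_congr
    rw [contains_iff_mem]
    by_cases hd : B - A = 0 <;>
      simp [hd, PySem.Set.ofList, PySem.List.slice_to, PySem.Int.divmod?]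
  · rw [Int.not_le] at hN
    set k := N.toNat with hkdef
    have hNk : (k : Int) = N := Int.toNat_of_nonneg (le_of_lt hN)
    have hk : k ≤ s.toList.length := by omega
    have hmem := loopA_mem s A B k hk 0
    rw [hNk] at hmem
    set p := pcount s.toList k with hpdef
    have hp : 0 ≤ p := pcount_nonneg _ _
    have hple : p ≤ N := by have := pcount_le s.toList k hk; omega
    have hmax : max N 0 = N := by omega
    have hslice : (PySem.Str.slice s none (some (max N 0))).toList = s.toList.take k := by
      rw [hmax, PySem.Str.toList_slice, PySem.Chars.slice_eq_listSlice,
        PySem.List.slice_to s.toList (le_of_lt hN), ← hkdef]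
    have hpfold : (PySem.Str.slice s none (some (max N 0))).toList.foldl
        (fun acc c => if c == '+' then acc + 1 else acc) 0 = p := by
      rw [hslice, PySem.List.foldl_beq_add_one]
      simp [hpdef, pcount]
    rw [hpfold, hmax]
    apply ifYN_congr
    rw [contains_iff_mem, hmem, alt_check p (N - p) A B hp (by omega)]
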